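-- pv_equiv track=rewrite | github.com/Mundero/VirusTotalHashScanner | utils/hash.py | _parse_7z_slt_output
-- ===== SOURCE A (Python) =====
-- def _parse_7z_slt_output(text: str) -> list[dict[str, str]]:
--     blocks = []
--     block: dict[str, str] = {}
--     for line in text.splitlines():
--         if not line.strip():
--             if block:
--                 blocks.append(block)
--                 block = {}
--             continue
--         if " = " in line:
--             key, value = line.split(" = ", 1)
--             block[key.strip()] = value.strip()
--     if block:
--         blocks.append(block)
--     return blocks
-- ===== SOURCE B (Python) =====
-- def _parse_7z_slt_output(text: str) -> list[dict[str, str]]: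
--     lines = text.splitlines()
--     n = len(lines)
--     blocks = []
--     i = 0
--     while i < n:
--         if not lines[i].strip():
--             i += 1
--             continue
--         j = i
--         while j < n and lines[j].strip():
--             j += 1
--         d = {k.strip(): v.strip()
--              for k, v in (ln.split(" = ", 1) for ln in lines[i:j] if " = " in ln)}
--         if d:
--             blocks.append(d)
--         i = j
--     return blocks
-- ===== Notes on version B (the rewrite author's own statement) =====
-- stated objective: alternative
-- what changed: A's single pass with a running dict flushed on blank lines is replaced by a two-level decomposition: an index scan that cuts the lines into maximal non-blank runs, then a dict comprehension turning each run into a block.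
import Mathlib
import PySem

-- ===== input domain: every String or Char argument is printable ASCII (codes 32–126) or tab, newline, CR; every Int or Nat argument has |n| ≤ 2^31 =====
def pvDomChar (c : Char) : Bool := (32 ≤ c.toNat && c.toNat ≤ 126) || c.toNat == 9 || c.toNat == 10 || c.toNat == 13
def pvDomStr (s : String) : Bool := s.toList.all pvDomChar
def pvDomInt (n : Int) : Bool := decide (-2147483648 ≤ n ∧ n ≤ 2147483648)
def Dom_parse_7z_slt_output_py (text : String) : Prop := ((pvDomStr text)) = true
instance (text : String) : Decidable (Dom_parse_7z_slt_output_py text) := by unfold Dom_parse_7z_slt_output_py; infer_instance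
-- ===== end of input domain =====

-- B replaces A's flush-on-blank running accumulator by a two-level decomposition
-- (split the lines into maximal non-blank runs, then build each run's dict with a
-- comprehension); same cost, chosen as an alternative decomposition.

-- ===== PORT A =====
-- loop body of A's for-loop: state = (blocks so far, current block)
def pvAStep (st : List (List (String × String)) × PySem.Dict String String) (line : String) :
    List (List (String × String)) × PySem.Dict String String :=
  if PySem.Str.strip line == "" then
    (if st.2.items.isEmpty then st else (st.1 ++ [st.2.items], PySem.Dict.empty))
  else if PySem.Str.isIn " = " line then
    match PySem.Str.splitMax? line " = " 1 with
    | some (key :: value :: _) =>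
        (st.1, st.2.insert (PySem.Str.strip key) (PySem.Str.strip value))
    | _ => st      -- unreachable: " = " in line gives two parts
  else st

def parse_7z_slt_output_py (text : String) : List (List (String × String)) :=
  let st := (PySem.Str.splitlines text).foldl pvAStep ([], PySem.Dict.empty)
  if st.2.items.isEmpty then st.1 else st.1 ++ [st.2.items]

-- ===== PORT B =====
-- `ln.split(" = ", 1)` guarded by `" = " in ln`, as one optional pair
def pvBParse (line : String) : Option (String × String) :=
  if PySem.Str.isIn " = " line then
    match PySem.Str.splitMax? line " = " 1 with
    | some (k :: v :: _) => some (PySem.Str.strip k, PySem.Str.strip v)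
    | _ => none
  else none

def pvBNonblank (line : String) : Bool := !(PySem.Str.strip line == "")

-- B's outer while-loop: skip blanks, cut off the maximal non-blank run
-- (the inner `while j` loop = takeWhile / dropWhile), turn it into a dict.
def pvBGo : List String → List (List (String × String))
  | [] => []
  | l :: rest =>
    if pvBNonblank l then
      let run := l :: rest.takeWhile pvBNonblank
      let d := PySem.Dict.ofList (run.filterMap pvBParse)
      (if d.items.isEmpty then [] else [d.items]) ++ pvBGo (rest.dropWhile pvBNonblank)
    else pvBGo rest
termination_by ls => ls.length
decreasing_by
· exact Nat.lt_succ_of_le (List.length_dropWhile_le _ _)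
· simp

def parse_7z_slt_output_py_alt (text : String) : List (List (String × String)) :=
  pvBGo (PySem.Str.splitlines text)

-- ===== PRECONDITION & SPEC =====
def Spec_parse_7z_slt_output_py (text : String) (out : List (List (String × String))) : Prop := out = parse_7z_slt_output_py_alt text
instance (text : String) (out : List (List (String × String))) : Decidable (Spec_parse_7z_slt_output_py text out) := by unfold Spec_parse_7z_slt_output_py; infer_instance

-- ===== CLAIM (what is proved, stated in full; the proofs are below) =====
def Claim_equal_parse_7z_slt_output_py : Prop := ∀ (text : String), Dom_parse_7z_slt_output_py text → Spec_parse_7z_slt_output_py text (parse_7z_slt_output_py text)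

-- ===== LEMMAS AND PROOFS =====

-- A's per-line action on the current block, for a non-blank line
def pvLineStep (d : PySem.Dict String String) (line : String) : PySem.Dict String String :=
  match pvBParse line with
  | some (k, v) => d.insert k v
  | none => d

def pvExtend (d : PySem.Dict String String) (run : List String) : PySem.Dict String String :=
  run.foldl pvLineStep d

def pvEmit (d : PySem.Dict String String) : List (List (String × String)) :=
  if d.items.isEmpty then [] else [d.items]

lemma pvOfList_filterMap (xs : List String) (d : PySem.Dict String String) :
    (xs.filterMap pvBParse).foldl (fun acc p => acc.insert p.1 p.2) d = pvExtend d xs := by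
  induction xs generalizing d with
  | nil => rfl
  | cons x xs ih =>
      simp only [List.filterMap_cons, pvExtend, List.foldl_cons, pvLineStep]
      cases h : pvBParse x with
      | none => exact ih d
      | some kv => simp only [List.foldl_cons]; exact ih _

lemma pvBlockOf_eq (run : List String) :
    PySem.Dict.ofList (run.filterMap pvBParse) = pvExtend PySem.Dict.empty run := by
  simpa [PySem.Dict.ofList, PySem.Dict.update] using pvOfList_filterMap run PySem.Dict.empty

lemma pvBGo_unfold (ls : List String) :
    pvBGo ls = pvEmit (pvExtend PySem.Dict.empty (ls.takeWhile pvBNonblank))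
                 ++ pvBGo (ls.dropWhile pvBNonblank) := by
  cases ls with
  | nil => rfl
  | cons l rest =>
      by_cases h : pvBNonblank l = true
      · rw [pvBGo]
        simp [h, pvBlockOf_eq, pvEmit]
      · conv_lhs => rw [pvBGo]
        simp [h, pvEmit, pvExtend, PySem.Dict.empty]
        conv_rhs => rw [pvBGo]
        simp [h]

lemma pvAStep_nonblank (st : List (List (String × String)) × PySem.Dict String String)
    (l : String) (h : pvBNonblank l = true) :
    pvAStep st l = (st.1, pvLineStep st.2 l) := by
  have h' : (PySem.Str.strip l == "") = false := by
    simpa [pvBNonblank] using h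
  simp only [pvAStep, pvLineStep, pvBParse, h', Bool.false_eq_true, if_false]
  split_ifs with hin
  · cases hsp : PySem.Str.splitMax? l " = " 1 with
    | none => rfl
    | some parts =>
        cases parts with
        | nil => rfl
        | cons k rest =>
            cases rest with
            | nil => rfl
            | cons v rest' => rfl
  · rfl

lemma pvMain (ls : List String) (blocks : List (List (String × String)))
    (d : PySem.Dict String String) :
    (let st := ls.foldl pvAStep (blocks, d);
     if st.2.items.isEmpty then st.1 else st.1 ++ [st.2.items]) =
      blocks ++ pvEmit (pvExtend d (ls.takeWhile pvBNonblank))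
             ++ pvBGo (ls.dropWhile pvBNonblank) := by
  induction ls generalizing blocks d with
  | nil =>
      simp only [List.foldl_nil, List.takeWhile_nil, List.dropWhile_nil, pvBGo,
        pvExtend, List.foldl_nil, pvEmit]
      by_cases h : d.items.isEmpty <;> simp [h]
  | cons l rest ih =>
      by_cases h : pvBNonblank l = true
      · have hstep := pvAStep_nonblank (blocks, d) l h
        simp only [List.foldl_cons, hstep, List.takeWhile_cons, h, if_true,
          List.dropWhile_cons, pvExtend, List.foldl_cons]
        exact ih blocks (pvLineStep d l)
      · have h' : (PySem.Str.strip l == "") = true := by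
          simpa [pvBNonblank] using h
        have hbgo : pvBGo (l :: rest) = pvBGo rest := by
          conv_lhs => rw [pvBGo]
          simp [h]
        rw [List.foldl_cons,
          show pvAStep (blocks, d) l =
              (if d.items.isEmpty then (blocks, d)
               else (blocks ++ [d.items], PySem.Dict.empty)) from by
            simp [pvAStep, h']]
        simp only [List.takeWhile_cons, h, Bool.false_eq_true, if_false,
          List.dropWhile_cons, hbgo]
        by_cases hd : d.items.isEmpty
        · have hde : d = PySem.Dict.empty := by
            apply PySem.Dict.ext; simpa [PySem.Dict.empty, List.isEmpty_iff] using hd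
          rw [if_pos hd, ih blocks d, hde]
          simp only [List.append_assoc]
          rw [← pvBGo_unfold rest]
          simp [pvEmit, pvExtend, PySem.Dict.empty]
        · rw [if_neg hd, ih (blocks ++ [d.items]) PySem.Dict.empty,
            show pvEmit (pvExtend d []) = [d.items] from by simp [pvEmit, pvExtend, hd]]
          simp only [List.append_assoc]
          rw [← pvBGo_unfold rest]

-- ===== VERDICT (by name: the statement is the Claim_ definition above) =====
theorem parse_7z_slt_output_py_spec : Claim_equal_parse_7z_slt_output_py := by
  intro text _
  unfold Spec_parse_7z_slt_output_py parse_7z_slt_output_py parse_7z_slt_output_py_alt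
  rw [pvMain]
  rw [pvBGo_unfold (PySem.Str.splitlines text)]
  simp
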